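-- pv_equiv track=rewrite | github.com/EugeneSamokhval/LAB3_NEW | counting_method_simplifier.py | union_conditions
-- ===== SOURCE A (Python) =====
-- def union_conditions(first_operand, second_operand)->bool:
--     if len(first_operand) != len(second_operand):
--         return False
--     flag = False
--     for iterator in range(len(first_operand)):
--         if first_operand[iterator] != second_operand[iterator] and not flag:
--             if len(first_operand[iterator]) == 2 and len(second_operand[iterator]) == 2:
--                 if first_operand[iterator][1] == second_operand[iterator][1]:
--                     flag = True
--             elif len(first_operand[iterator]) == 1 and len(second_operand[iterator]) == 2:
--                 if first_operand[iterator][0] == second_operand[iterator][1]: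
--                     flag = True
--             elif len(first_operand[iterator]) == 2 and len(second_operand[iterator]) == 1:
--                 if first_operand[iterator][1] == second_operand[iterator][0]:
--                     flag = True
--         elif first_operand[iterator] != second_operand[iterator] and flag:
--             return False
--     return flag
-- ===== SOURCE B (Python) =====
-- def union_conditions(first_operand, second_operand) -> bool:
--     if len(first_operand) != len(second_operand):
--         return False
--     diffs = [i for i in range(len(first_operand))
--              if first_operand[i] != second_operand[i]]
--
--     def unifiable(i):
--         a, b = first_operand[i], second_operand[i]
--         if len(a) not in (1, 2) or len(b) not in (1, 2):
--             return False
--         if len(a) == 1 and len(b) == 1: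
--             return False
--         return a[-1] == b[-1]
--
--     for i in diffs:
--         if unifiable(i):
--             return i == diffs[-1]
--     return False
-- ===== Notes on version B (the rewrite author's own statement) =====
-- stated objective: alternative
-- what changed: Instead of a flag-carrying single loop with three length-case branches, B first collects the list of differing indices, defines unifiability once via the last character a[-1]==b[-1] guarded by lengths in {1,2} (not both 1), and returns True iff the first unifiable differing index is the last differing index.
import Mathlib
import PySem

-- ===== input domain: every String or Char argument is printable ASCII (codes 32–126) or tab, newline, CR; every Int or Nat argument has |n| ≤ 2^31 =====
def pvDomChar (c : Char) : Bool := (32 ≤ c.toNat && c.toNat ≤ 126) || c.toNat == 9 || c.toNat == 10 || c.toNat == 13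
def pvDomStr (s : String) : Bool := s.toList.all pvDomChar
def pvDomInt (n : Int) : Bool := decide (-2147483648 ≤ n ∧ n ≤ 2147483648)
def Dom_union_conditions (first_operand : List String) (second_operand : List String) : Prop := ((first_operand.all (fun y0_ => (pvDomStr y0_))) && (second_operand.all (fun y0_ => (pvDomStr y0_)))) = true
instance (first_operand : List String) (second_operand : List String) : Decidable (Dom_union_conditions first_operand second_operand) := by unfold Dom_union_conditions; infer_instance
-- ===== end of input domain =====

-- B replaces A's flag-carrying loop by collecting the differing indices and checking that
-- the first unifiable differing index is the last differing index (objective: alternative).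


-- ===== PORT A =====
-- A's for-loop with early return, as structural recursion over the index list and the flag.
def ucA_loop (f s : List String) : List Nat → Bool → Bool
  | [], flag => flag
  | i :: rest, flag =>
    let a := f.getD i ""
    let b := s.getD i ""
    if a ≠ b ∧ flag = false then
      if a.toList.length = 2 ∧ b.toList.length = 2 then
        if a.toList.getD 1 ' ' = b.toList.getD 1 ' ' then ucA_loop f s rest true
        else ucA_loop f s rest flag
      else if a.toList.length = 1 ∧ b.toList.length = 2 then
        if a.toList.getD 0 ' ' = b.toList.getD 1 ' ' then ucA_loop f s rest true
        else ucA_loop f s rest flag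
      else if a.toList.length = 2 ∧ b.toList.length = 1 then
        if a.toList.getD 1 ' ' = b.toList.getD 0 ' ' then ucA_loop f s rest true
        else ucA_loop f s rest flag
      else ucA_loop f s rest flag
    else if a ≠ b ∧ flag = true then false
    else ucA_loop f s rest flag

def union_conditions (first_operand : List String) (second_operand : List String) : Bool :=
  if first_operand.length ≠ second_operand.length then false
  else ucA_loop first_operand second_operand (List.range first_operand.length) false

-- ===== PORT B =====
-- unifiable: both lengths in {1,2}, not both 1, and the last characters agree (a[-1] == b[-1]).
def pvUnifiable (a b : String) : Bool :=
  ((a.toList.length == 1 || a.toList.length == 2) &&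
   (b.toList.length == 1 || b.toList.length == 2)) &&
  !(a.toList.length == 1 && b.toList.length == 1) &&
  a.toList.getLast? == b.toList.getLast?

def union_conditions_alt (first_operand : List String) (second_operand : List String) : Bool :=
  if first_operand.length ≠ second_operand.length then false
  else
    let diffs := (List.range first_operand.length).filter
      (fun i => first_operand.getD i "" ≠ second_operand.getD i "")
    match diffs.find? (fun i => pvUnifiable (first_operand.getD i "") (second_operand.getD i "")) with
    | none => false
    | some i => decide (diffs.getLast? = some i)

-- ===== PRECONDITION & SPEC =====
def Spec_union_conditions (first_operand : List String) (second_operand : List String) (out : Bool) : Prop := out = union_conditions_alt first_operand second_operand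
instance (first_operand : List String) (second_operand : List String) (out : Bool) : Decidable (Spec_union_conditions first_operand second_operand out) := by unfold Spec_union_conditions; infer_instance

-- ===== CLAIM (what is proved, stated in full; the proofs are below) =====
def Claim_equal_union_conditions : Prop := ∀ (first_operand : List String) (second_operand : List String), Dom_union_conditions first_operand second_operand → Spec_union_conditions first_operand second_operand (union_conditions first_operand second_operand)

-- ===== LEMMAS AND PROOFS =====

-- B's body on an arbitrary index list (proof-side restatement of union_conditions_alt's else-branch)
def ucB (f s : List String) (l : List Nat) : Bool :=
  let diffs := l.filter (fun i => f.getD i "" ≠ s.getD i "")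
  match diffs.find? (fun i => pvUnifiable (f.getD i "") (s.getD i "")) with
  | none => false
  | some i => decide (diffs.getLast? = some i)

-- A's nested three-way length test equals pvUnifiable
theorem unif_eq (a b : String) (T F : Bool) :
    (if a.toList.length = 2 ∧ b.toList.length = 2 then
        if a.toList.getD 1 ' ' = b.toList.getD 1 ' ' then T else F
      else if a.toList.length = 1 ∧ b.toList.length = 2 then
        if a.toList.getD 0 ' ' = b.toList.getD 1 ' ' then T else F
      else if a.toList.length = 2 ∧ b.toList.length = 1 then
        if a.toList.getD 1 ' ' = b.toList.getD 0 ' ' then T else F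
      else F) = (if pvUnifiable a b then T else F) := by
  rcases ha : a.toList with _ | ⟨x, _ | ⟨y, _ | ⟨z, t⟩⟩⟩ <;>
    rcases hb : b.toList with _ | ⟨u, _ | ⟨v, _ | ⟨w, r⟩⟩⟩ <;>
    simp [pvUnifiable, ha, hb, List.getLast?]

theorem getLast?_mem {t : List Nat} {x : Nat} (h : t.getLast? = some x) : x ∈ t := by
  induction t with
  | nil => simp at h
  | cons a t ih =>
    cases t with
    | nil => simp [List.getLast?] at h; simp [h]
    | cons b t' =>
      rw [List.getLast?_cons_cons] at h
      exact List.mem_cons_of_mem _ (ih h)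

-- A's loop with the flag already set: true iff no remaining index differs
theorem ucA_true (f s : List String) (l : List Nat) :
    ucA_loop f s l true =
      decide (l.filter (fun i => f.getD i "" ≠ s.getD i "") = []) := by
  induction l with
  | nil => simp [ucA_loop]
  | cons i rest ih =>
    simp only [ucA_loop]
    by_cases hd : f.getD i "" = s.getD i ""
    · rw [if_neg (fun h => by cases h.2), if_neg (fun h => h.1 hd), ih,
        List.filter_cons, if_neg (by simpa using hd)]
    · rw [if_neg (fun h => by cases h.2), if_pos ⟨hd, by trivial⟩, List.filter_cons,
        if_pos (by simpa using hd)]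
      simp

-- Main invariant: A's loop from flag = false equals B's body, for duplicate-free index lists
theorem ucA_eq_ucB (f s : List String) (l : List Nat) (hnd : l.Nodup) :
    ucA_loop f s l false = ucB f s l := by
  induction l with
  | nil => simp [ucA_loop, ucB]
  | cons i rest ih =>
    obtain ⟨hnotin, hnd'⟩ := List.nodup_cons.mp hnd
    by_cases hd : f.getD i "" = s.getD i ""
    · -- equal position: both sides skip it
      have hA : ucA_loop f s (i :: rest) false = ucA_loop f s rest false := by
        simp only [ucA_loop]
        rw [if_neg (fun h => h.1 hd), if_neg (fun h => h.1 hd)]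
      have hfilt : (i :: rest).filter (fun j => f.getD j "" ≠ s.getD j "") =
          rest.filter (fun j => f.getD j "" ≠ s.getD j "") := by
        rw [List.filter_cons, if_neg (by simpa using hd)]
      rw [hA, ih hnd']
      simp only [ucB, hfilt]
    · have hstep : ucA_loop f s (i :: rest) false =
          (if pvUnifiable (f.getD i "") (s.getD i "") then ucA_loop f s rest true
           else ucA_loop f s rest false) := by
        simp only [ucA_loop]
        rw [if_pos ⟨hd, by trivial⟩]
        exact unif_eq _ _ _ _
      have hfilt : (i :: rest).filter (fun j => f.getD j "" ≠ s.getD j "") =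
          i :: rest.filter (fun j => f.getD j "" ≠ s.getD j "") := by
        rw [List.filter_cons, if_pos (by simpa using hd)]
      by_cases hu : pvUnifiable (f.getD i "") (s.getD i "") = true
      · -- first unifiable difference: succeed iff no further difference
        rw [hstep, if_pos hu, ucA_true]
        have hi : i ∉ rest.filter (fun j => f.getD j "" ≠ s.getD j "") := by
          intro hmem; exact hnotin (List.mem_of_mem_filter hmem)
        simp only [ucB, hfilt]
        rw [List.find?_cons_of_pos (by exact hu)]
        cases htail : rest.filter (fun j => f.getD j "" ≠ s.getD j "") with
        | nil => simp
        | cons j t =>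
          rw [List.getLast?_cons_cons]
          have hne : (j :: t).getLast? ≠ some i := by
            intro hcontra
            exact hi (htail ▸ getLast?_mem hcontra)
          simp [hne]
      · -- non-unifiable difference before the flag is set: skipped by both
        rw [hstep, if_neg hu, ih hnd']
        simp only [ucB, hfilt]
        rw [List.find?_cons_of_neg (by exact hu)]
        cases hf : (rest.filter (fun j => f.getD j "" ≠ s.getD j "")).find?
            (fun j => pvUnifiable (f.getD j "") (s.getD j "")) with
        | none => rfl
        | some j =>
          have hjmem : j ∈ rest.filter (fun k => f.getD k "" ≠ s.getD k "") :=
            List.mem_of_find?_eq_some hf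
          cases htail : rest.filter (fun k => f.getD k "" ≠ s.getD k "") with
          | nil => rw [htail] at hjmem; simp at hjmem
          | cons m t => rw [List.getLast?_cons_cons]

-- ===== VERDICT (by name: the statement is the Claim_ definition above) =====
theorem union_conditions_spec : Claim_equal_union_conditions := by
  intro f s _
  unfold Spec_union_conditions union_conditions union_conditions_alt
  by_cases hlen : f.length = s.length
  · rw [if_neg (by simp [hlen]), if_neg (by simp [hlen])]
    exact ucA_eq_ucB f s (List.range f.length) List.nodup_range
  · rw [if_pos hlen, if_pos hlen]
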